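-- pv_equiv track=rewrite | github.com/ShirinRo/euler | utils.py | non_primitve_pythagorean_triplets
-- ===== SOURCE A (Python) =====
-- import math
--
-- def triplet(m, n):
--     msq = m * m
--     nsq = n * n
--     return sorted([msq - nsq, 2 * m * n, msq + nsq])
--
-- def gcd(a, b):
--     return math.gcd(a, b)
--
-- def primitive_pythagorean_triplets(max_value):
--     triplets = []
--     for m in range(1, max_value + 1):
--         for n in range(1, m):
--             if (m - n) % 2 == 1 and gcd(m, n) == 1:
--                 triplets += [triplet(m, n)]
--     return triplets
--
-- def non_primitve_pythagorean_triplets(max_value):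
--     """
--     :param primitive_triplets: primitive pythagorean triplets, sorted from smallest to largest.
--     :param max_value: i love shaul.
--     :return: list of triplets with non-primitve multiplications of given triplets.
--     """
--     primitives = primitive_pythagorean_triplets(max_value)
--     new_list = []
--     for triplet in primitives:
--         smallest = triplet[0]
--         n = 1
--         while smallest * n < max_value:
--             new_list += [[x * n for x in triplet]]
--             n += 1
--     return new_list
-- ===== SOURCE B (Python) =====
-- import math
--
-- def non_primitve_pythagorean_triplets(max_value):
--     result = []
--     m = 2
--     while 2 * m - 1 < max_value:
--         # n-window 1: 2*m*n < max_value  <=>  n <= (max_value-1)//(2m)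
--         hi1 = (max_value - 1) // (2 * m)
--         if hi1 > m - 1:
--             hi1 = m - 1
--         # n-window 2: m*m - n*n < max_value  <=>  n > isqrt(m*m - max_value)
--         d = m * m - max_value
--         lo2 = 1 if d < 0 else math.isqrt(d) + 1
--         if lo2 <= hi1:
--             lo2 = hi1 + 1
--         if lo2 > m:
--             lo2 = m
--         for n in list(range(1, hi1 + 1)) + list(range(lo2, m)):
--             if (m - n) % 2 == 1 and math.gcd(m, n) == 1:
--                 a = m * m - n * n
--                 b = 2 * m * n
--                 if a < b:
--                     t = [a, b, m * m + n * n]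
--                     s = a
--                 else:
--                     t = [b, a, m * m + n * n]
--                     s = b
--                 for k in range(1, (max_value - 1) // s + 1):
--                     result.append([x * k for x in t])
--         m += 1
--     return result
-- ===== Notes on version B (the rewrite author's own statement) =====
-- stated objective: faster
-- what changed: Instead of enumerating every (m,n) pair up to max_value and then multiplying each primitive triplet in a second pass with a while loop, B bounds m by half of max_value and, for each m, visits only the two n-windows whose triplet has its smallest leg below max_value (even-leg window and odd-leg window, the latter found with isqrt), emitting all multiples at once via a closed-form count.
import Mathlib
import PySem

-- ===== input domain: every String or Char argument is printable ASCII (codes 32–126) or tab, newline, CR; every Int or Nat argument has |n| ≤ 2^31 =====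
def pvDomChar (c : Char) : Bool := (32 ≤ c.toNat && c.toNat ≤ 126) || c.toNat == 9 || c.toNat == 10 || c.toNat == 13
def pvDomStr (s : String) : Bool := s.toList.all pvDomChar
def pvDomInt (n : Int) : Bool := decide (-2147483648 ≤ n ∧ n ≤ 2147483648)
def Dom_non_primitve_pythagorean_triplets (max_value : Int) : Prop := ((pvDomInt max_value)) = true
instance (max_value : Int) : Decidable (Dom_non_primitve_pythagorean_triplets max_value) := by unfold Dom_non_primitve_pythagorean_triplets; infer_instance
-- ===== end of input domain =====

-- B bounds m by half of max_value and visits only the two n-windows per m whose smallest leg stays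
-- below the bound, emitting every multiple at once with a closed-form count — measured faster than A's full (m,n) sweep.


-- ===== PORT A =====
-- helper triplet(m, n)
def pvTriplet (m n : Int) : List Int :=
  PySem.List.sorted [m * m - n * n, 2 * m * n, m * m + n * n] (fun x => x) false

-- helper gcd(a, b) = math.gcd (nonnegative)
def pvGcd (a b : Int) : Int := (Int.gcd a b : Int)

def primitive_pythagorean_triplets (max_value : Int) : List (List Int) :=
  (PySem.List.pyRange 1 (max_value + 1) 1).foldl (fun triplets m =>
    (PySem.List.pyRange 1 m 1).foldl (fun triplets n =>
      if PySem.Int.mod (m - n) 2 == 1 && pvGcd m n == 1 then triplets ++ [pvTriplet m n]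
      else triplets) triplets) []

-- the inner 'while smallest * n < max_value' loop of A; the '1 ≤ smallest ∧ 1 ≤ n' conjuncts are a
-- totality guard only (Python diverges there; every actual call has smallest ≥ 3 and starts at n = 1)
def pvMulLoop (max_value smallest : Int) (t : List Int) (n : Int) (acc : List (List Int)) :
    List (List Int) :=
  if h : smallest * n < max_value ∧ 1 ≤ smallest ∧ 1 ≤ n then
    pvMulLoop max_value smallest t (n + 1) (acc ++ [t.map (· * n)])
  else acc
termination_by (max_value - smallest * n).toNat
decreasing_by simp only [mul_add, mul_one]; have h1 := h.1; have h2 := h.2.1; omega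

def non_primitve_pythagorean_triplets (max_value : Int) : List (List Int) :=
  (primitive_pythagorean_triplets max_value).foldl (fun new_list t =>
    -- smallest = triplet[0]: pyGetD is exact here, every triplet has 3 elements
    pvMulLoop max_value (PySem.List.pyGetD t 0 0) t 1 new_list) []

-- ===== PORT B =====
-- hand port of math.isqrt (PySem has no isqrt and Mathlib's Nat.sqrt is not kernel-reducible):
-- fuel-driven halving recursion, exact for every d ≥ 0 reached with fuel ≥ d (pvIsqrtAux_sq_le below)
def pvIsqrtAux : Nat → Nat → Nat
  | 0, _ => 0
  | f + 1, n =>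
    if n < 2 then n
    else
      let r := 2 * pvIsqrtAux f (n / 4)
      if (r + 1) * (r + 1) ≤ n then r + 1 else r

def pvIsqrt (d : Int) : Int := (pvIsqrtAux d.toNat d.toNat : Nat)

-- the local 'hi1' of Source B: the last n of window 1 (2*m*n < max_value)
def pvHi1 (max_value m : Int) : Int :=
  let hi0 := PySem.Int.floordiv (max_value - 1) (2 * m)
  if hi0 > m - 1 then m - 1 else hi0

-- the local 'lo2' of Source B: the first n of window 2 (m*m - n*n < max_value)
def pvLo2 (max_value m : Int) : Int :=
  let d := m * m - max_value
  let lo0 := if d < 0 then 1 else pvIsqrt d + 1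
  let lo1 := if lo0 ≤ pvHi1 max_value m then pvHi1 max_value m + 1 else lo0
  if lo1 > m then m else lo1

-- body of B's 'for n in …' loop
def pvAltInner (max_value m : Int) (acc : List (List Int)) (n : Int) : List (List Int) :=
  if PySem.Int.mod (m - n) 2 == 1 && (Int.gcd m n : Int) == 1 then
    let a := m * m - n * n
    let b := 2 * m * n
    let s := if a < b then a else b
    let t := if a < b then [a, b, m * m + n * n] else [b, a, m * m + n * n]
    (PySem.List.pyRange 1 (PySem.Int.floordiv (max_value - 1) s + 1) 1).foldl
      (fun acc2 k => acc2 ++ [t.map (· * k)]) acc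
  else acc

-- B's 'while 2*m - 1 < max_value' loop
def pvAltMLoop (max_value m : Int) (acc : List (List Int)) : List (List Int) :=
  if h : 2 * m - 1 < max_value then
    pvAltMLoop max_value (m + 1)
      ((PySem.List.pyRange 1 (pvHi1 max_value m + 1) 1 ++
        PySem.List.pyRange (pvLo2 max_value m) m 1).foldl (pvAltInner max_value m) acc)
  else acc
termination_by (max_value - (2 * m - 1)).toNat
decreasing_by omega

def non_primitve_pythagorean_triplets_alt (max_value : Int) : List (List Int) :=
  pvAltMLoop max_value 2 []

-- ===== PRECONDITION & SPEC =====
def Spec_non_primitve_pythagorean_triplets (max_value : Int) (out : List (List Int)) : Prop := out = non_primitve_pythagorean_triplets_alt max_value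
instance (max_value : Int) (out : List (List Int)) : Decidable (Spec_non_primitve_pythagorean_triplets max_value out) := by unfold Spec_non_primitve_pythagorean_triplets; infer_instance

-- ===== CLAIM (what is proved, stated in full; the proofs are below) =====
def Claim_equal_non_primitve_pythagorean_triplets : Prop := ∀ (max_value : Int), Dom_non_primitve_pythagorean_triplets max_value → Spec_non_primitve_pythagorean_triplets max_value (non_primitve_pythagorean_triplets max_value)

-- ===== LEMMAS AND PROOFS =====

-- the smaller leg and the sorted triplet, in closed form
def pvS (m n : Int) : Int :=
  if m * m - n * n < 2 * m * n then m * m - n * n else 2 * m * n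

def pvT (m n : Int) : List Int :=
  if m * m - n * n < 2 * m * n then [m * m - n * n, 2 * m * n, m * m + n * n]
  else [2 * m * n, m * m - n * n, m * m + n * n]

-- per-(m,n) contribution both programs produce
def pvContrib (max_value m n : Int) : List (List Int) :=
  if PySem.Int.mod (m - n) 2 == 1 && (Int.gcd m n : Int) == 1 then
    (PySem.List.pyRange 1 (PySem.Int.floordiv (max_value - 1) (pvS m n) + 1) 1).map
      (fun k => (pvT m n).map (· * k))
  else []

def pvPerM (max_value m : Int) : List (List Int) :=
  (PySem.List.pyRange 1 m 1).flatMap (pvContrib max_value m)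

-- multiplication pass applied to one triplet, as a function (A side)
def pvG (max_value : Int) (t : List Int) : List (List Int) :=
  (PySem.List.pyRange 1 (PySem.Int.floordiv (max_value - 1) (PySem.List.pyGetD t 0 0) + 1) 1).map
    (fun k => t.map (· * k))

lemma flatMap_congr_mem {α β : Type} (l : List α) (f g : α → List β)
    (h : ∀ x ∈ l, f x = g x) : l.flatMap f = l.flatMap g := by
  simp only [List.flatMap_def]
  rw [List.map_congr_left h]

lemma flatMap_filter_eq {α β : Type} (xs : List α) (p : α → Bool) (h : α → List β) :
    (xs.filter p).flatMap h = xs.flatMap (fun x => if p x then h x else []) := by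
  induction xs with
  | nil => rfl
  | cons y ys ih =>
    by_cases hy : p y <;> simp [hy, ih]

-- Python's sorted on three values whose last is strictly largest
lemma sorted3 (a b c : Int) (hac : a < c) (hbc : b < c) :
    PySem.List.sorted [a, b, c] (fun x => x) false = if a < b then [a, b, c] else [b, a, c] := by
  split_ifs with h
  · apply PySem.List.sorted_eq_of_perm_of_pairwise_lt
    · exact List.Perm.refl _
    · simp [List.pairwise_cons]; omega
  · rcases lt_or_eq_of_le (not_lt.mp h) with hba | hba
    · apply PySem.List.sorted_eq_of_perm_of_pairwise_lt
      · exact List.Perm.swap _ _ _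
      · simp [List.pairwise_cons]; omega
    · rw [← hba]
      apply PySem.List.sorted_eq_self_of_pairwise
      simp [List.pairwise_cons]; omega

lemma pvTriplet_char (m n : Int) (h1 : 1 ≤ n) (h2 : n < m) :
    pvTriplet m n = pvT m n := by
  have hmn : 1 ≤ m - n := by omega
  have hac : m * m - n * n < m * m + n * n := by nlinarith
  have hbc : 2 * m * n < m * m + n * n := by nlinarith [sq_nonneg (m - n)]
  rw [pvTriplet, sorted3 _ _ _ hac hbc, pvT]

lemma pvS_pos (m n : Int) (h1 : 1 ≤ n) (h2 : n < m) : 1 ≤ pvS m n := by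
  have hapos : 1 ≤ m * m - n * n := by nlinarith
  have hbpos : 1 ≤ 2 * m * n := by nlinarith
  unfold pvS
  split_ifs <;> omega

lemma pvT_head (m n : Int) : PySem.List.pyGetD (pvT m n) 0 0 = pvS m n := by
  unfold pvT pvS
  split_ifs <;> simp [PySem.List.pyGetD_zero_cons]

lemma pvIsqrtAux_sq_le : ∀ (f n : Nat), n ≤ f → pvIsqrtAux f n * pvIsqrtAux f n ≤ n := by
  intro f
  induction f with
  | zero => intro n hn; simp [pvIsqrtAux]
  | succ f ih =>
    intro n hn
    rw [pvIsqrtAux]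
    by_cases h2 : n < 2
    · simp only [if_pos h2]; interval_cases n <;> decide
    · have hih := ih (n / 4) (by omega)
      simp only [if_neg h2]
      set s := pvIsqrtAux f (n / 4) with hs
      have hsq : 2 * s * (2 * s) = 4 * (s * s) := by ring
      split_ifs with hstep
      · exact hstep
      · omega

lemma pvIsqrt_sq_le (d : Int) (hd : 0 ≤ d) : pvIsqrt d * pvIsqrt d ≤ d := by
  have h := pvIsqrtAux_sq_le d.toNat d.toNat le_rfl
  unfold pvIsqrt
  omega

-- A's while loop in closed form
lemma pvMulLoop_eq (max_value s : Int) (hs : 1 ≤ s) (t : List Int) :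
    ∀ (n : Int) (acc : List (List Int)), 1 ≤ n →
      pvMulLoop max_value s t n acc =
        acc ++ (PySem.List.pyRange n (PySem.Int.floordiv (max_value - 1) s + 1) 1).map
          (fun k => t.map (· * k)) := by
  have H : ∀ (k : Nat) (n : Int) (acc : List (List Int)), 1 ≤ n →
      (max_value - s * n).toNat ≤ k →
      pvMulLoop max_value s t n acc =
        acc ++ (PySem.List.pyRange n (PySem.Int.floordiv (max_value - 1) s + 1) 1).map
          (fun k => t.map (· * k)) := by
    intro k
    induction k with
    | zero =>
      intro n acc hn hk
      have hge : max_value ≤ s * n := by omega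
      rw [pvMulLoop, dif_neg (by rintro ⟨hlt, -, -⟩; omega)]
      have hlt : PySem.Int.floordiv (max_value - 1) s < n :=
        (PySem.Int.floordiv_lt_iff_lt_mul (by omega)).mpr (by nlinarith)
      rw [PySem.List.pyRange_one_eq_nil (by omega)]
      simp
    | succ k ih =>
      intro n acc hn hk
      by_cases hc : s * n < max_value
      · rw [pvMulLoop, dif_pos ⟨hc, hs, hn⟩]
        have hle : n ≤ PySem.Int.floordiv (max_value - 1) s :=
          (PySem.Int.le_floordiv_iff_mul_le (by omega)).mpr (by nlinarith)
        rw [PySem.List.pyRange_one_cons (by omega)]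
        rw [ih (n + 1) (acc ++ [t.map (· * n)]) (by omega)
          (by simp only [mul_add, mul_one]; omega)]
        simp
      · rw [pvMulLoop, dif_neg (by rintro ⟨hlt, -, -⟩; omega)]
        have hlt : PySem.Int.floordiv (max_value - 1) s < n :=
          (PySem.Int.floordiv_lt_iff_lt_mul (by omega)).mpr (by nlinarith)
        rw [PySem.List.pyRange_one_eq_nil (by omega)]
        simp
  exact fun n acc hn => H (max_value - s * n).toNat n acc hn le_rfl

lemma pvContrib_nil (max_value m n : Int) (h1 : 1 ≤ n) (h2 : n < m)
    (hb : max_value ≤ 2 * m * n) (ha : max_value ≤ m * m - n * n) :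
    pvContrib max_value m n = [] := by
  unfold pvContrib
  split_ifs with hcond
  · have hs := pvS_pos m n h1 h2
    have hsmax : max_value ≤ pvS m n := by unfold pvS; split_ifs <;> omega
    have hlt : PySem.Int.floordiv (max_value - 1) (pvS m n) < 1 :=
      (PySem.Int.floordiv_lt_iff_lt_mul (by omega)).mpr (by omega)
    rw [PySem.List.pyRange_one_eq_nil (by omega)]
    simp
  · rfl

lemma pvPerM_nil (max_value m : Int) (hm : 2 ≤ m) (h : max_value + 1 ≤ 2 * m) :
    pvPerM max_value m = [] := by
  unfold pvPerM
  apply List.flatMap_eq_nil_iff.mpr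
  intro n hn
  rw [PySem.List.mem_pyRange_one] at hn
  have hnn : n * n ≤ (m - 1) * (m - 1) :=
    Int.mul_self_le_mul_self (by omega) (by omega)
  have hexp : (m - 1) * (m - 1) = m * m - 2 * m + 1 := by ring
  apply pvContrib_nil max_value m n hn.1 hn.2
  · nlinarith
  · omega

lemma pvPerM_one (max_value : Int) : pvPerM max_value 1 = [] := by
  simp [pvPerM, PySem.List.pyRange_one_eq_nil]

lemma prims_eq (max_value : Int) :
    primitive_pythagorean_triplets max_value =
      (PySem.List.pyRange 1 (max_value + 1) 1).flatMap (fun m =>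
        ((PySem.List.pyRange 1 m 1).filter
          (fun n => PySem.Int.mod (m - n) 2 == 1 && pvGcd m n == 1)).map (pvTriplet m)) := by
  unfold primitive_pythagorean_triplets
  trans ((PySem.List.pyRange 1 (max_value + 1) 1).foldl (fun acc m => acc ++
      ((PySem.List.pyRange 1 m 1).filter
        (fun n => PySem.Int.mod (m - n) 2 == 1 && pvGcd m n == 1)).map (pvTriplet m)) [])
  · apply PySem.List.foldl_congr_mem
    intro acc m _
    exact PySem.List.foldl_append_if _ _ _ _
  · rw [PySem.List.foldl_append_eq_flatMap]
    simp

lemma mem_prims (max_value : Int) (t : List Int)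
    (h : t ∈ primitive_pythagorean_triplets max_value) :
    ∃ m n, 1 ≤ n ∧ n < m ∧ t = pvTriplet m n := by
  rw [prims_eq] at h
  simp only [List.mem_flatMap, List.mem_map, List.mem_filter,
    PySem.List.mem_pyRange_one] at h
  obtain ⟨m, _, n, ⟨⟨hn1, hn2⟩, _⟩, rfl⟩ := h
  exact ⟨m, n, hn1, hn2, rfl⟩

-- A equals the flatMap of per-(m,n) contributions over the full ranges
lemma portA_eq (max_value : Int) :
    non_primitve_pythagorean_triplets max_value =
      (PySem.List.pyRange 1 (max_value + 1) 1).flatMap (pvPerM max_value) := by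
  unfold non_primitve_pythagorean_triplets
  trans ((primitive_pythagorean_triplets max_value).foldl
      (fun acc t => acc ++ pvG max_value t) [])
  · apply PySem.List.foldl_congr_mem
    intro acc t ht
    obtain ⟨m, n, hn1, hn2, rfl⟩ := mem_prims max_value t ht
    rw [pvTriplet_char m n hn1 hn2, pvT_head]
    rw [pvMulLoop_eq max_value _ (pvS_pos m n hn1 hn2) _ 1 acc le_rfl]
    rw [pvG, pvT_head]
  rw [PySem.List.foldl_append_eq_flatMap, List.nil_append, prims_eq, List.flatMap_assoc]
  apply flatMap_congr_mem
  intro m _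
  rw [List.flatMap_map, flatMap_filter_eq]
  apply flatMap_congr_mem
  intro n hn
  rw [PySem.List.mem_pyRange_one] at hn
  obtain ⟨hn1, hn2⟩ := hn
  show (if PySem.Int.mod (m - n) 2 == 1 && pvGcd m n == 1
    then pvG max_value (pvTriplet m n) else []) = pvContrib max_value m n
  unfold pvContrib pvGcd
  split_ifs with hcond
  · rw [pvG, pvTriplet_char m n hn1 hn2, pvT_head]
  · rfl

-- B's inner loop body
lemma pvAltInner_eq (max_value m : Int) (acc : List (List Int)) (n : Int) :
    pvAltInner max_value m acc n = acc ++ pvContrib max_value m n := by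
  simp only [pvAltInner, pvContrib, pvS, pvT]
  split_ifs with hcond hab
  · exact PySem.List.foldl_append_singleton_eq_map _ _ _
  · exact PySem.List.foldl_append_singleton_eq_map _ _ _
  · simp

-- window-1 bound: above pvHi1 (and below m) the even leg reaches max_value
lemma pvHi1_facts (max_value m : Int) (hm : 2 ≤ m) (hc : 2 * m - 1 < max_value) :
    0 ≤ pvHi1 max_value m ∧ pvHi1 max_value m ≤ m - 1 ∧
      ∀ n, pvHi1 max_value m < n → n ≤ m - 1 → max_value ≤ 2 * m * n := by
  simp only [pvHi1]
  have h0 : 0 ≤ PySem.Int.floordiv (max_value - 1) (2 * m) :=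
    (PySem.Int.le_floordiv_iff_mul_le (by omega)).mpr (by omega)
  split_ifs with hcap
  · exact ⟨by omega, le_rfl, fun n h1 h2 => absurd h2 (by omega)⟩
  · refine ⟨h0, by omega, fun n h1 _ => ?_⟩
    have := (PySem.Int.floordiv_lt_iff_lt_mul (a := max_value - 1) (b := 2 * m)
      (q := n) (by omega)).mp (by omega)
    nlinarith

-- window-2 bound: between pvHi1 and pvLo2 the odd leg reaches max_value
lemma pvLo2_facts (max_value m : Int) (hm : 2 ≤ m) (hc : 2 * m - 1 < max_value) :
    pvHi1 max_value m + 1 ≤ pvLo2 max_value m ∧ pvLo2 max_value m ≤ m ∧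
      ∀ n, 1 ≤ n → pvHi1 max_value m < n → n < pvLo2 max_value m →
        max_value ≤ m * m - n * n := by
  obtain ⟨hh0, hhm, -⟩ := pvHi1_facts max_value m hm hc
  have hiq : 0 ≤ pvIsqrt (m * m - max_value) := by unfold pvIsqrt; positivity
  simp only [pvLo2]
  by_cases hneg : m * m - max_value < 0
  · simp only [if_pos hneg]
    split_ifs with hle hcap1 hcap2 <;>
      exact ⟨by omega, by omega, fun n hn h1 h2 => by omega⟩
  · simp only [if_neg hneg]
    have hsq := pvIsqrt_sq_le (m * m - max_value) (by omega)
    split_ifs with hle hcap1 hcap2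
    · exact ⟨by omega, le_rfl, fun n hn h1 h2 => by omega⟩
    · exact ⟨le_rfl, by omega, fun n hn h1 h2 => by omega⟩
    · refine ⟨by omega, le_rfl, fun n hn h1 h2 => ?_⟩
      have : n * n ≤ pvIsqrt (m * m - max_value) * pvIsqrt (m * m - max_value) :=
        Int.mul_self_le_mul_self (by omega) (by omega)
      omega
    · refine ⟨by omega, by omega, fun n hn h1 h2 => ?_⟩
      have : n * n ≤ pvIsqrt (m * m - max_value) * pvIsqrt (m * m - max_value) :=
        Int.mul_self_le_mul_self (by omega) (by omega)
      omega

-- the two windows cover every contributing n of [1, m)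
lemma window_eq (max_value m : Int) (hm : 2 ≤ m) (hc : 2 * m - 1 < max_value) :
    (PySem.List.pyRange 1 (pvHi1 max_value m + 1) 1 ++
      PySem.List.pyRange (pvLo2 max_value m) m 1).flatMap (pvContrib max_value m) =
      pvPerM max_value m := by
  obtain ⟨hh0, hhm, hwin1⟩ := pvHi1_facts max_value m hm hc
  obtain ⟨hlo1, hlom, hwin2⟩ := pvLo2_facts max_value m hm hc
  unfold pvPerM
  rw [PySem.List.pyRange_one_append 1 (pvHi1 max_value m + 1) m (by omega) (by omega),
    PySem.List.pyRange_one_append (pvHi1 max_value m + 1) (pvLo2 max_value m) m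
      (by omega) (by omega)]
  rw [List.flatMap_append, List.flatMap_append, List.flatMap_append]
  have hgap : (PySem.List.pyRange (pvHi1 max_value m + 1) (pvLo2 max_value m) 1).flatMap
      (pvContrib max_value m) = [] := by
    apply List.flatMap_eq_nil_iff.mpr
    intro n hn
    rw [PySem.List.mem_pyRange_one] at hn
    exact pvContrib_nil max_value m n (by omega) (by omega)
      (hwin1 n (by omega) (by omega)) (hwin2 n (by omega) (by omega) (by omega))
  rw [hgap]
  simp

-- B's while loop in closed form
lemma pvAltMLoop_eq (max_value : Int) :
    ∀ (m : Int) (acc : List (List Int)), 2 ≤ m →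
      pvAltMLoop max_value m acc =
        acc ++ (PySem.List.pyRange m (PySem.Int.floordiv max_value 2 + 1) 1).flatMap
          (pvPerM max_value) := by
  have H : ∀ (k : Nat) (m : Int) (acc : List (List Int)), 2 ≤ m →
      (max_value - (2 * m - 1)).toNat ≤ k →
      pvAltMLoop max_value m acc =
        acc ++ (PySem.List.pyRange m (PySem.Int.floordiv max_value 2 + 1) 1).flatMap
          (pvPerM max_value) := by
    intro k
    induction k with
    | zero =>
      intro m acc hm hk
      rw [pvAltMLoop, dif_neg (by omega)]
      have hlt : PySem.Int.floordiv max_value 2 < m :=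
        (PySem.Int.floordiv_lt_iff_lt_mul (by omega)).mpr (by omega)
      rw [PySem.List.pyRange_one_eq_nil (by omega)]
      simp
    | succ k ih =>
      intro m acc hm hk
      by_cases hc : 2 * m - 1 < max_value
      · rw [pvAltMLoop, dif_pos hc]
        have hfold : (PySem.List.pyRange 1 (pvHi1 max_value m + 1) 1 ++
            PySem.List.pyRange (pvLo2 max_value m) m 1).foldl (pvAltInner max_value m) acc =
            acc ++ pvPerM max_value m := by
          trans ((PySem.List.pyRange 1 (pvHi1 max_value m + 1) 1 ++
              PySem.List.pyRange (pvLo2 max_value m) m 1).foldl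
              (fun acc n => acc ++ pvContrib max_value m n) acc)
          · apply PySem.List.foldl_congr_mem
            intro acc n _
            exact pvAltInner_eq max_value m acc n
          · rw [PySem.List.foldl_append_eq_flatMap, window_eq max_value m hm hc]
        rw [hfold]
        have hle : m ≤ PySem.Int.floordiv max_value 2 :=
          (PySem.Int.le_floordiv_iff_mul_le (by omega)).mpr (by omega)
        rw [PySem.List.pyRange_one_cons (by omega)]
        rw [ih (m + 1) _ (by omega) (by omega)]
        simp
      · rw [pvAltMLoop, dif_neg hc]
        have hlt : PySem.Int.floordiv max_value 2 < m :=
          (PySem.Int.floordiv_lt_iff_lt_mul (by omega)).mpr (by omega)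
        rw [PySem.List.pyRange_one_eq_nil (by omega)]
        simp
  exact fun m acc hm => H (max_value - (2 * m - 1)).toNat m acc hm le_rfl

-- trimming A's m-range [1, max_value+1) to B's [2, max_value//2 + 1)
lemma range_trim (max_value : Int) :
    (PySem.List.pyRange 1 (max_value + 1) 1).flatMap (pvPerM max_value) =
      (PySem.List.pyRange 2 (PySem.Int.floordiv max_value 2 + 1) 1).flatMap
        (pvPerM max_value) := by
  by_cases hbig : 4 ≤ max_value
  · have hfd2 : 2 ≤ PySem.Int.floordiv max_value 2 :=
      (PySem.Int.le_floordiv_iff_mul_le (by omega)).mpr (by omega)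
    have hfdlt : PySem.Int.floordiv max_value 2 < max_value :=
      (PySem.Int.floordiv_lt_iff_lt_mul (by omega)).mpr (by omega)
    rw [PySem.List.pyRange_one_append 1 2 (max_value + 1) (by omega) (by omega),
      PySem.List.pyRange_one_append 2 (PySem.Int.floordiv max_value 2 + 1) (max_value + 1)
        (by omega) (by omega)]
    rw [List.flatMap_append, List.flatMap_append]
    have h1 : PySem.List.pyRange 1 2 1 = [1] := by decide
    have h3 : (PySem.List.pyRange (PySem.Int.floordiv max_value 2 + 1) (max_value + 1) 1).flatMap
        (pvPerM max_value) = [] := by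
      apply List.flatMap_eq_nil_iff.mpr
      intro m hm
      rw [PySem.List.mem_pyRange_one] at hm
      have : max_value < m * 2 :=
        (PySem.Int.floordiv_lt_iff_lt_mul (by omega)).mp (by omega)
      exact pvPerM_nil max_value m (by omega) (by omega)
    rw [h1, h3]
    simp [pvPerM_one]
  · have h2 : PySem.Int.floordiv max_value 2 < 2 :=
      (PySem.Int.floordiv_lt_iff_lt_mul (by omega)).mpr (by omega)
    rw [PySem.List.pyRange_one_eq_nil
      (b := (PySem.Int.floordiv max_value 2 + 1)) (by omega)]
    rw [List.flatMap_nil]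
    apply List.flatMap_eq_nil_iff.mpr
    intro m hm
    rw [PySem.List.mem_pyRange_one] at hm
    rcases eq_or_lt_of_le hm.1 with h1 | h1
    · rw [← h1]; exact pvPerM_one max_value
    · exact pvPerM_nil max_value m (by omega) (by omega)

-- ===== VERDICT (by name: the statement is the Claim_ definition above) =====
theorem non_primitve_pythagorean_triplets_spec : Claim_equal_non_primitve_pythagorean_triplets := by
  intro max_value _
  unfold Spec_non_primitve_pythagorean_triplets
  rw [portA_eq, range_trim, non_primitve_pythagorean_triplets_alt,
    pvAltMLoop_eq max_value 2 [] (by omega), List.nil_append]
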